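-- pv_equiv track=rewrite | github.com/NikolsSkola/2025GrupasDarbsProg | Dastins_Jevdokimovs_12a_blackjack_cardlab_v22.py | _build_deck_tuples
-- ===== SOURCE A (Python) =====
-- SUITS = ["♠", "♥", "♦", "♣"]
--
-- RANKS = ["A", "2", "3", "4", "5", "6", "7", "8", "9", "10", "J", "Q", "K"]
--
-- def _build_deck_tuples(num_decks: int):
--     """Build a deck as a list of (value, is_ace) tuples — no Card objects."""
--     out = []
--     for _ in range(num_decks):
--         for s in SUITS:
--             for r in RANKS:
--                 v = 11 if r == "A" else (10 if r in "KQJ" else int(r))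
--                 out.append((v, r == "A"))
--     return out
-- ===== SOURCE B (Python) =====
-- SUITS = ["♠", "♥", "♦", "♣"]
--
-- RANKS = ["A", "2", "3", "4", "5", "6", "7", "8", "9", "10", "J", "Q", "K"]
--
-- def _build_deck_tuples(num_decks: int):
--     """Compute each card directly from its flat index: rank position j = i % 13
--     gives value 11 for an ace (j == 0), else min(j + 1, 10).
--     One flat pass, pure integer arithmetic — no string tests, no nested loops."""
--     def card(i):
--         j = i % 13
--         return (11 if j == 0 else min(j + 1, 10), j == 0)
--     return [card(i) for i in range(52 * num_decks)]
-- ===== Notes on version B (the rewrite author's own statement) =====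
-- stated objective: alternative
-- what changed: B computes each card directly from its flat index by modular arithmetic on the rank position in one pass over the whole range, eliminating A's triple nested loop over suit and rank lists and all string membership tests and int() parsing.
import Mathlib
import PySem

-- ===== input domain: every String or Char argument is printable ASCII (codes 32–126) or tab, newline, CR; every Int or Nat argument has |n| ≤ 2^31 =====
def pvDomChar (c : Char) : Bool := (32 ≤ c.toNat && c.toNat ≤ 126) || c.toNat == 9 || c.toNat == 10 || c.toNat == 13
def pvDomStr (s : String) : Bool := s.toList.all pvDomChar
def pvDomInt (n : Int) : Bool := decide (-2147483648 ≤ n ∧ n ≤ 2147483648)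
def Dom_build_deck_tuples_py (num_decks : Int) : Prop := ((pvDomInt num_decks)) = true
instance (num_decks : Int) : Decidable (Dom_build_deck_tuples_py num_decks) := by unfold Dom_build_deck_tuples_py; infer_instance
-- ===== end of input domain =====

-- B computes each card from its flat index by integer arithmetic in one pass over range(52*num_decks),
-- instead of A's triple nested loop with string tests: an alternative index-arithmetic algorithm.

-- ===== PORT A =====
def pvSuitsA : List String := ["♠", "♥", "♦", "♣"]
def pvRanksA : List String := ["A", "2", "3", "4", "5", "6", "7", "8", "9", "10", "J", "Q", "K"]

-- literal transliteration of A: out = []; for _ in range(num_decks): for s in SUITS: for r in RANKS: out.append(...).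
-- Python's mutable list with O(1) append is rendered as an Array accumulator (push), returned as a List.
-- int(r) ported as (PySem.Int.ofStr? r).getD 0 — exact here: that branch is reached only for the digit ranks.
def build_deck_tuples_py (num_decks : Int) : List (Int × Bool) :=
  ((PySem.List.pyRange 0 num_decks 1).foldl (fun out _ =>
    pvSuitsA.foldl (fun out _s =>
      pvRanksA.foldl (fun out r =>
        out.push (if r == "A" then (11 : Int)
                  else if PySem.Str.isIn r "KQJ" then 10
                  else (PySem.Int.ofStr? r).getD 0,
                  r == "A")) out) out) (#[] : Array (Int × Bool))).toList

-- ===== PORT B =====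
-- card(i): j = i % 13; (11 if j == 0 else min(j+1, 10), j == 0); [card(i) for i in range(52*num_decks)]
-- i % 13 ported with PySem.Int.mod (Python's floor mod).
def pvCardB (i : Int) : Int × Bool :=
  let j := PySem.Int.mod i 13
  (if j == 0 then (11 : Int) else min (j + 1) 10, j == 0)

def build_deck_tuples_py_alt (num_decks : Int) : List (Int × Bool) :=
  (PySem.List.pyRange 0 (52 * num_decks) 1).map pvCardB

-- ===== PRECONDITION & SPEC =====
def Spec_build_deck_tuples_py (num_decks : Int) (out : List (Int × Bool)) : Prop := out = build_deck_tuples_py_alt num_decks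
instance (num_decks : Int) (out : List (Int × Bool)) : Decidable (Spec_build_deck_tuples_py num_decks out) := by unfold Spec_build_deck_tuples_py; infer_instance

-- ===== CLAIM (what is proved, stated in full; the proofs are below) =====
def Claim_equal_build_deck_tuples_py : Prop := ∀ (num_decks : Int), Dom_build_deck_tuples_py num_decks → Spec_build_deck_tuples_py num_decks (build_deck_tuples_py num_decks)

-- ===== LEMMAS AND PROOFS =====

-- the common single-deck block both programs produce 52 times
def pvDeck : List (Int × Bool) :=
  ((List.range 4).map (fun _ =>
    [((11:Int), true), (2, false), (3, false), (4, false), (5, false), (6, false), (7, false),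
     (8, false), (9, false), (10, false), (10, false), (10, false), (10, false)])).flatten

theorem pvCardB_shift (i : Int) : pvCardB (52 + i) = pvCardB i := by
  have h : PySem.Int.mod (52 + i) 13 = PySem.Int.mod i 13 := by
    simp only [PySem.Int.mod_eq_emod_of_pos (by norm_num : (0:Int) < 13)]
    omega
  simp only [pvCardB, h]

-- the first 52 indices give exactly the deck block
theorem pvB_base : (PySem.List.pyRange 0 52 1).map pvCardB = pvDeck := by decide

-- B's comprehension over 52*k indices is k copies of the deck
theorem pvB_eq (k : Nat) :
    (PySem.List.pyRange 0 (52 * (k : Int)) 1).map pvCardB = (List.replicate k pvDeck).flatten := by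
  induction k with
  | zero => simp [PySem.List.pyRange_one_eq_nil]
  | succ k ih =>
    have h1 : (0:Int) ≤ 52 := by norm_num
    have h2 : (52:Int) ≤ 52 * ((k:Int) + 1) := by omega
    rw [show ((k+1 : Nat) : Int) = (k : Int) + 1 by push_cast; ring,
        PySem.List.pyRange_one_append 0 52 (52 * ((k:Int)+1)) h1 h2, List.map_append, pvB_base]
    have h3 : PySem.List.pyRange 52 (52 * ((k:Int)+1)) 1
        = (PySem.List.pyRange 0 (52 * (k:Int)) 1).map (fun j => 52 + j) := by
      rw [PySem.List.pyRange_one, PySem.List.pyRange_one]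
      have : (52 * ((k:Int)+1) - 52).toNat = (52 * (k:Int) - 0).toNat := by omega
      rw [this, List.map_map]
      exact List.map_congr_left (fun x _ => by simp)
    rw [h3, List.map_map]
    have h4 : (PySem.List.pyRange 0 (52 * (k:Int)) 1).map (pvCardB ∘ fun j => 52 + j)
        = (PySem.List.pyRange 0 (52 * (k:Int)) 1).map pvCardB :=
      List.map_congr_left (fun x _ => pvCardB_shift x)
    rw [h4, ih]
    simp [List.replicate_succ]

-- an append-one-per-element loop over l pushes exactly l.map f
theorem pv_foldl_push {α T : Type} (f : α → T) (l : List α) (a : Array T) :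
    (l.foldl (fun o x => o.push (f x)) a).toList = a.toList ++ l.map f := by
  induction l generalizing a with
  | nil => simp
  | cons x xs ih => simp [List.foldl, ih (a.push (f x))]

-- a loop whose body appends the fixed block M appends one copy of M per element
theorem pv_foldl_app {α T : Type} (M : List T) (g : Array T → Array T)
    (hg : ∀ a : Array T, (g a).toList = a.toList ++ M) (l : List α) (a : Array T) :
    (l.foldl (fun a _ => g a) a).toList = a.toList ++ (List.replicate l.length M).flatten := by
  induction l generalizing a with
  | nil => simp
  | cons x xs ih => simp [List.foldl, ih, hg, List.replicate, List.append_assoc]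

-- A's inner double loop over the constant SUITS × RANKS appends exactly the deck block
theorem pv_body_eq (a : Array (Int × Bool)) :
    (pvSuitsA.foldl (fun out _s =>
      pvRanksA.foldl (fun out r =>
        out.push (if r == "A" then (11 : Int)
                  else if PySem.Str.isIn r "KQJ" then 10
                  else (PySem.Int.ofStr? r).getD 0,
                  r == "A")) out) a).toList = a.toList ++ pvDeck := by
  rw [pv_foldl_app (pvRanksA.map (fun r =>
        ((if r == "A" then (11 : Int)
          else if PySem.Str.isIn r "KQJ" then 10
          else (PySem.Int.ofStr? r).getD 0),
         r == "A")))
      _ (fun a => pv_foldl_push _ pvRanksA a) pvSuitsA a]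
  congr 1

-- ===== VERDICT (by name: the statement is the Claim_ definition above) =====
theorem build_deck_tuples_py_spec : Claim_equal_build_deck_tuples_py := by
  intro n _
  unfold Spec_build_deck_tuples_py build_deck_tuples_py build_deck_tuples_py_alt
  rw [pv_foldl_app pvDeck _ pv_body_eq (PySem.List.pyRange 0 n 1) #[],
      PySem.List.length_pyRange_one]
  by_cases hn : 0 ≤ n
  · have h := pvB_eq n.toNat
    rw [show ((n.toNat : Int)) = n by omega] at h
    rw [h]
    simp [show n - 0 = n by ring]
  · rw [PySem.List.pyRange_one_eq_nil (by omega : (52 * n : Int) ≤ 0)]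
    have h0 : (n - 0).toNat = 0 := by omega
    simp [h0]
    intro h1
    omega
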